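-- pv_equiv track=rewrite | github.com/kaito-project/kaito | docker/presets/models/tfs/download_and_gen_dockerfile.py | parse_huggingface_info
-- ===== SOURCE A (Python) =====
-- def parse_huggingface_info(model_version: str):
--     """
--     Parse model version string to extract repo name and revision from a HuggingFace model URL.
--
--     Args:
--         model_version: A HuggingFace URL that may include commit, branch, or tag information
--
--     Returns:
--         tuple: (repo_name, revision) where:
--             - repo_name: Name of the repository (e.g. 'mistralai/Mistral-7B-Instruct-v0.3')
--             - revision: The commit hash, branch name, or tag name
--
--     Examples:
--         - "https://huggingface.co/mistralai/Mistral-7B-Instruct-v0.3/commit/e0bc86c23ce5aae1db576c8cca6f06f1f73af2db"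
--             -> ("mistralai/Mistral-7B-Instruct-v0.3", "e0bc86c23ce5aae1db576c8cca6f06f1f73af2db")
--         - "https://huggingface.co/mistralai/Mistral-7B-Instruct-v0.3/tree/main"
--             -> ("mistralai/Mistral-7B-Instruct-v0.3", "main")
--         - "https://huggingface.co/mistralai/Mistral-7B-Instruct-v0.3"
--             -> ("mistralai/Mistral-7B-Instruct-v0.3", "main")
--     """
--     # Extract everything after huggingface.co/
--     parts = model_version.split("huggingface.co/", 1)
--     if len(parts) < 2:
--         return None, "main"
--
--     path_parts = parts[1].split("/")
--
--     # At minimum, we need the org/repo part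
--     if len(path_parts) < 2:
--         return parts[1], "main"
--
--     # Build the repo name (handle cases where repo name has multiple parts)
--     repo_name_parts = []
--     revision = "main"  # Default revision
--
--     # Process path parts to extract repo name and revision
--     i = 0
--     while i < len(path_parts):
--         if path_parts[i] in ["commit", "tree", "blob", "tag"]:
--             if i + 1 < len(path_parts):
--                 revision = path_parts[i + 1]
--             break
--         repo_name_parts.append(path_parts[i])
--         i += 1
--
--     repo_name = "/".join(repo_name_parts)
--
--     return repo_name, revision
-- ===== SOURCE B (Python) =====
-- KEYWORDS = ("commit", "tree", "blob", "tag")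
--
--
-- def parse_huggingface_info(model_version: str):
--     parts = model_version.split("huggingface.co/", 1)
--     if len(parts) < 2:
--         return None, "main"
--     p1 = parts[1]
--     if "/" not in p1:
--         return p1, "main"
--     # Work on the raw string: a keyword segment is exactly an occurrence of
--     # the slash-wrapped keyword in the slash-padded path. Find each keyword's
--     # first occurrence and keep the leftmost hit.
--     padded = "/" + p1 + "/"
--     hits = [(padded.find("/" + kw + "/"), kw) for kw in KEYWORDS]
--     hits = [h for h in hits if h[0] != -1]
--     if not hits:
--         return p1, "main"
--     pos, kw = min(hits, key=lambda h: h[0])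
--     repo = p1[:pos - 1] if pos > 0 else ""
--     end = pos + len(kw)          # index in p1 of the slash after kw (or len(p1))
--     if end >= len(p1):
--         return repo, "main"
--     rest = p1[end + 1:]
--     k = rest.find("/")
--     return repo, (rest if k == -1 else rest[:k])
-- ===== Notes on version B (the rewrite author's own statement) =====
-- stated objective: alternative
-- what changed: B never builds or scans a list of path segments: it pads the path with slashes and locates the keyword segment by raw substring search (one find per keyword of the slash-wrapped keyword, leftmost hit wins), then cuts repo and revision directly out of the string by index arithmetic, whereas A splits into segments and walks them with an accumulator loop.
import Mathlib
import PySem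

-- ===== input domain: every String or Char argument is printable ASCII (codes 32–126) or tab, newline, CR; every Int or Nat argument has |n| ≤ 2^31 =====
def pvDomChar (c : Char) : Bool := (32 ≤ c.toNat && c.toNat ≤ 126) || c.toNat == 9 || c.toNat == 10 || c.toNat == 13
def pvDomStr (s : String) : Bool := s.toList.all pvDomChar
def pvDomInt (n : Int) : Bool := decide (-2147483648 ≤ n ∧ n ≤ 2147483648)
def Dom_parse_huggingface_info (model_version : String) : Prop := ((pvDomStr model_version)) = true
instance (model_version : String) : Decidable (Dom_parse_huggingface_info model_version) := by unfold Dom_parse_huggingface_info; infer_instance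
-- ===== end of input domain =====

-- B never builds a list of path segments: it locates the keyword by raw substring search
-- ("/kw/" in the slash-padded path, leftmost hit of the four keywords) and cuts repo and
-- revision out of the string by index arithmetic; objective: alternative (same cost).

-- ===== PORT A =====
-- A's while loop: walk path_parts with an accumulator of repo-name parts and the revision
def pvALoop : List String → List String → String → (List String × String)
  | [], acc, rev => (acc, rev)
  | x :: rest, acc, rev =>
      if x ∈ ["commit", "tree", "blob", "tag"] then
        match rest with
        | y :: _ => (acc, y)
        | [] => (acc, rev)
      else pvALoop rest (acc ++ [x]) rev

def parse_huggingface_info (model_version : String) : Option String × String :=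
  match PySem.Str.splitMax? model_version "huggingface.co/" 1 with
  | none => (none, "main")   -- unreachable: separator is non-empty
  | some parts =>
    if parts.length < 2 then (none, "main")
    else
      let p1 := parts.getD 1 ""
      let path_parts := (PySem.Str.split? p1 "/").getD []   -- "/" ≠ "": split? is always some
      if path_parts.length < 2 then (some p1, "main")
      else
        let r := pvALoop path_parts [] "main"
        (some (PySem.Str.join "/" r.1), r.2)

-- ===== PORT B =====
def pvKw : List (List Char) := ["commit".toList, "tree".toList, "blob".toList, "tag".toList]

-- strings are ported as their code-point lists (PySem.Chars); exact on every input
def parse_huggingface_info_alt (model_version : String) : Option String × String :=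
  match PySem.Str.splitMax? model_version "huggingface.co/" 1 with
  | none => (none, "main")   -- unreachable: separator is non-empty
  | some parts =>
    if parts.length < 2 then (none, "main")
    else
      let p1 := parts.getD 1 ""
      let s := p1.toList
      if PySem.Chars.isIn ['/'] s = false then (some p1, "main")
      else
        let padded := '/' :: s ++ ['/']        -- "/" + p1 + "/"
        let hits := (pvKw.map (fun kw => (PySem.Chars.find padded ('/' :: kw ++ ['/']), kw))).filter
            (fun h => h.1 != -1)
        match hits with
        | [] => (some p1, "main")
        | h0 :: hrest =>
          let best := hrest.foldl (fun b h => if h.1 < b.1 then h else b) h0   -- min(hits, key=h[0])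
          let pos := best.1
          let kw := best.2
          let repo := if 0 < pos then PySem.Chars.slice s none (some (pos - 1)) else []
          let endi := pos + (kw.length : Int)
          if (s.length : Int) ≤ endi then (some (String.ofList repo), "main")
          else
            let rest := PySem.Chars.slice s (some (endi + 1)) none
            let k := PySem.Chars.find rest ['/']
            (some (String.ofList repo),
             String.ofList (if k = -1 then rest else PySem.Chars.slice rest none (some k)))

-- ===== PRECONDITION & SPEC =====
def Spec_parse_huggingface_info (model_version : String) (out : Option String × String) : Prop := out = parse_huggingface_info_alt model_version
instance (model_version : String) (out : Option String × String) : Decidable (Spec_parse_huggingface_info model_version out) := by unfold Spec_parse_huggingface_info; infer_instance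

-- ===== CLAIM (what is proved, stated in full; the proofs are below) =====
def Claim_equal_parse_huggingface_info : Prop := ∀ (model_version : String), Dom_parse_huggingface_info model_version → Spec_parse_huggingface_info model_version (parse_huggingface_info model_version)

-- ===== LEMMAS AND PROOFS =====

-- splitting a char list at '/' (proof-side model of Python's s.split("/"))
def pvSplitSlash : List Char → List (List Char)
  | [] => [[]]
  | c :: rest =>
      if c = '/' then [] :: pvSplitSlash rest
      else (c :: (pvSplitSlash rest).headI) :: (pvSplitSlash rest).tail

-- start offset of segment i inside "/".join(ss) shifted by the leading pad slash
def pvOffset (ss : List (List Char)) (i : ℕ) : ℕ := ((ss.take i).map (fun t => t.length + 1)).sum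

lemma pvSplitSlash_ne_nil (s : List Char) : pvSplitSlash s ≠ [] := by
  cases s with
  | nil => simp [pvSplitSlash]
  | cons c rest => simp only [pvSplitSlash]; split <;> simp

lemma pvSplitOn_go_spec (fuel : ℕ) : ∀ (l cur : List Char) (acc : List (List Char)),
    l.length < fuel →
    PySem.Chars.splitOn.go ['/'] fuel l cur acc
      = acc.reverse ++ (cur.reverse ++ (pvSplitSlash l).headI) :: (pvSplitSlash l).tail := by
  induction fuel with
  | zero => intro l cur acc h; omega
  | succ f ih =>
    intro l cur acc h
    rw [PySem.Chars.splitOn.go.eq_def]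
    cases l with
    | nil => simp [pvSplitSlash]
    | cons c rest =>
      simp only []
      by_cases hc : c = '/'
      · have hpre : (['/'] : List Char).isPrefixOf (c :: rest) = true := by
          subst hc; simp [List.isPrefixOf]
        rw [if_pos hpre]
        have : List.drop (['/'] : List Char).length (c :: rest) = rest := by simp
        rw [this, ih rest [] (cur.reverse :: acc) (by simp at h ⊢; omega)]
        subst hc
        rcases h2 : pvSplitSlash rest with _ | ⟨a2, b2⟩
        · exact absurd h2 (pvSplitSlash_ne_nil rest)
        · simp [pvSplitSlash, h2]
      · have hpre : (['/'] : List Char).isPrefixOf (c :: rest) = false := by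
          simp [List.isPrefixOf]; exact fun h' => (hc h'.symm).elim
        rw [if_neg (by simp [hpre])]
        rw [ih rest (c :: cur) acc (by simp at h ⊢; omega)]
        simp [pvSplitSlash, if_neg hc]

lemma pvSplitOn_eq (s : List Char) : PySem.Chars.splitOn s ['/'] = pvSplitSlash s := by
  unfold PySem.Chars.splitOn
  rw [pvSplitOn_go_spec (s.length + 1) s [] [] (by omega)]
  rcases hss : pvSplitSlash s with _ | ⟨h, t⟩
  · exact absurd hss (pvSplitSlash_ne_nil s)
  · simp

lemma pvJoin_splitSlash (s : List Char) :
    PySem.Chars.join ['/'] (pvSplitSlash s) = s := by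
  induction s with
  | nil => simp [pvSplitSlash, PySem.Chars.join_singleton]
  | cons c rest ih =>
    rcases hss : pvSplitSlash rest with _ | ⟨h, t⟩
    · exact absurd hss (pvSplitSlash_ne_nil rest)
    · by_cases hc : c = '/'
      · subst hc
        have e1 : pvSplitSlash ('/' :: rest) = [] :: pvSplitSlash rest := by
          simp [pvSplitSlash]
        rw [e1, hss, PySem.Chars.join_cons_cons, ← hss, ih]
        simp
      · have e1 : pvSplitSlash (c :: rest) = (c :: h) :: t := by
          simp [pvSplitSlash, if_neg hc, hss]
        rw [e1]
        cases t with
        | nil =>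
          rw [PySem.Chars.join_singleton]
          have h2 := ih; rw [hss, PySem.Chars.join_singleton] at h2
          rw [h2]
        | cons t0 tt =>
          rw [PySem.Chars.join_cons_cons]
          have h2 := ih; rw [hss, PySem.Chars.join_cons_cons] at h2
          simp only [List.cons_append, List.append_assoc] at h2 ⊢
          rw [h2]

lemma pvSplitSlash_noslash (s : List Char) : ∀ t ∈ pvSplitSlash s, '/' ∉ t := by
  induction s with
  | nil => intro t ht; simp [pvSplitSlash] at ht; simp [ht]
  | cons c rest ih =>
    intro t ht
    rcases hss : pvSplitSlash rest with _ | ⟨h, tt⟩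
    · exact absurd hss (pvSplitSlash_ne_nil rest)
    · by_cases hc : c = '/'
      · rw [pvSplitSlash, if_pos hc] at ht
        rcases List.mem_cons.mp ht with h1 | h1
        · simp [h1]
        · exact ih t h1
      · rw [pvSplitSlash, if_neg hc, hss] at ht
        simp only [List.headI, List.tail] at ht
        rcases List.mem_cons.mp ht with h1 | h1
        · subst h1
          intro hmem
          rcases List.mem_cons.mp hmem with h2 | h2
          · exact hc h2.symm
          · exact ih h (by rw [hss]; exact List.mem_cons_self) h2
        · exact ih t (by rw [hss]; exact List.mem_cons_of_mem _ h1)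

lemma pvSplitSlash_len2 (s : List Char) :
    2 ≤ (pvSplitSlash s).length ↔ '/' ∈ s := by
  induction s with
  | nil => simp [pvSplitSlash]
  | cons c rest ih =>
    by_cases hc : c = '/'
    · subst hc
      have e1 : pvSplitSlash ('/' :: rest) = [] :: pvSplitSlash rest := by simp [pvSplitSlash]
      rw [e1]
      simp only [List.length_cons, List.mem_cons]
      constructor
      · intro _; left; trivial
      · intro _
        have h1 : 1 ≤ (pvSplitSlash rest).length := by
          cases h : pvSplitSlash rest with
          | nil => exact absurd h (pvSplitSlash_ne_nil rest)
          | cons a b => simp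
        omega
    · rcases hss : pvSplitSlash rest with _ | ⟨h, t⟩
      · exact absurd hss (pvSplitSlash_ne_nil rest)
      · have e1 : pvSplitSlash (c :: rest) = (c :: h) :: t := by
          simp [pvSplitSlash, if_neg hc, hss]
        rw [e1]
        rw [hss] at ih
        simp only [List.length_cons, List.mem_cons] at ih ⊢
        constructor
        · intro hlen; right; exact ih.mp (by omega)
        · intro hmem
          rcases hmem with h1 | h1
          · exact absurd h1.symm hc
          · have := ih.mpr h1; omega

lemma pvOffset_zero (ss : List (List Char)) : pvOffset ss 0 = 0 := by
  simp [pvOffset]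

lemma pvOffset_cons_succ (a : List Char) (ss : List (List Char)) (i : ℕ) :
    pvOffset (a :: ss) (i + 1) = a.length + 1 + pvOffset ss i := by
  simp [pvOffset, List.take_succ_cons]

lemma pvOffset_lt (ss : List (List Char)) : ∀ (i i' : ℕ), i < i' → i' ≤ ss.length →
    pvOffset ss i < pvOffset ss i' := by
  induction ss with
  | nil => intro i i' h1 h2; simp at h2; omega
  | cons a rest ih =>
    intro i i' h1 h2
    cases i' with
    | zero => omega
    | succ j =>
      rw [pvOffset_cons_succ]
      cases i with
      | zero =>
        rw [pvOffset_zero]; omega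
      | succ k =>
        rw [pvOffset_cons_succ]
        have := ih k j (by omega) (by simpa using h2)
        omega

lemma pvOffset_mono (ss : List (List Char)) (i i' : ℕ) (hii : i ≤ i') (hi' : i' ≤ ss.length) :
    pvOffset ss i ≤ pvOffset ss i' := by
  rcases Nat.lt_or_ge i i' with h | h
  · exact Nat.le_of_lt (pvOffset_lt ss i i' h hi')
  · have : i = i' := Nat.le_antisymm hii (Nat.le_of_lt_succ (Nat.lt_succ_of_le h))
    subst this; exact Nat.le_refl _

-- prefix by a slash-terminated slash-free word, against a slash-free word followed by a slash
lemma pvH1 (x : List Char) : ∀ (y L : List Char), '/' ∉ x → '/' ∉ y → L.head? = some '/' →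
    ((x ++ ['/']) <+: (y ++ L) ↔ x = y) := by
  induction x with
  | nil =>
    intro y L hx hy hL
    rcases L with _ | ⟨c, t⟩
    · simp at hL
    · simp only [List.head?_cons, Option.some.injEq] at hL
      cases y with
      | nil => simp [List.cons_prefix_cons, hL]
      | cons d y' =>
        simp only [List.nil_append, List.cons_append, List.cons_prefix_cons]
        constructor
        · rintro ⟨h1, -⟩
          exact absurd (by rw [h1]; exact List.mem_cons_self) hy
        · intro h; simp at h
  | cons a x' ih =>
    intro y L hx hy hL
    have hx' : '/' ∉ x' := fun h => hx (List.mem_cons_of_mem _ h)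
    have ha : a ≠ '/' := fun h => hx (by rw [h]; exact List.mem_cons_self)
    cases y with
    | nil =>
      rcases L with _ | ⟨c, t⟩
      · simp at hL
      · simp only [List.head?_cons, Option.some.injEq] at hL
        simp only [List.nil_append, List.cons_append, List.cons_prefix_cons]
        constructor
        · rintro ⟨h1, -⟩; exact absurd (h1.trans hL) ha
        · intro h; simp at h
    | cons d y' =>
      have hy' : '/' ∉ y' := fun h => hy (List.mem_cons_of_mem _ h)
      have hd : d ≠ '/' := fun h => hy (by rw [h]; exact List.mem_cons_self)
      simp only [List.cons_append, List.cons_prefix_cons]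
      rw [ih y' L hx' hy' hL]
      constructor
      · rintro ⟨h1, h2⟩; rw [h1, h2]
      · intro h; injection h with h1 h2; exact ⟨h1, h2⟩

lemma pvHeadPrefix (u v : List Char) (h : ('/' :: u) <+: v) : v.head? = some '/' := by
  rcases h with ⟨t, ht⟩; subst ht; rfl

def pvPad (ss : List (List Char)) : List Char := '/' :: PySem.Chars.join ['/'] ss ++ ['/']

lemma pvPad_cons_cons (a b : List Char) (r : List (List Char)) :
    pvPad (a :: b :: r) = ('/' :: a) ++ pvPad (b :: r) := by
  simp [pvPad, PySem.Chars.join_cons_cons]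

lemma pvPad_decomp (a : List Char) (rest : List (List Char)) :
    ∃ L : List Char, pvPad (a :: rest) = '/' :: (a ++ L) ∧ L.head? = some '/' := by
  cases rest with
  | nil => exact ⟨['/'], by simp [pvPad, PySem.Chars.join_singleton], rfl⟩
  | cons b r => exact ⟨pvPad (b :: r), by rw [pvPad_cons_cons]; simp, rfl⟩

lemma pvOffset_succ_take (ss : List (List Char)) (i : ℕ) (h : i < ss.length) :
    pvOffset ss (i + 1) = pvOffset ss i + (ss.getD i []).length + 1 := by
  unfold pvOffset
  rw [List.take_succ, List.map_append, List.sum_append]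
  rw [List.getElem?_eq_getElem h]
  rw [List.getD_eq_getElem ss [] h]
  simp
  omega

-- occurrences of "/kw/" in the padded join are exactly the keyword segments
lemma pvOcc (kw : List Char) (hkne : kw ≠ []) (hk : '/' ∉ kw) :
    ∀ (ss : List (List Char)), (∀ t ∈ ss, '/' ∉ t) → ∀ (j : ℕ),
    (('/' :: kw ++ ['/']) <+: (pvPad ss).drop j
      ↔ ∃ i, i < ss.length ∧ j = pvOffset ss i ∧ ss.getD i [] = kw) := by
  have hkwlen : 1 ≤ kw.length := by
    cases kw with
    | nil => exact absurd rfl hkne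
    | cons c t => simp
  intro ss
  induction ss with
  | nil =>
    intro _ j
    constructor
    · intro h
      exfalso
      have hle := h.length_le
      have h2 : (List.drop j (pvPad [])).length ≤ 2 := by
        simp [pvPad, PySem.Chars.join_nil, List.length_drop]
      simp only [List.length_cons, List.length_append] at hle
      omega
    · rintro ⟨i, hi, -⟩; simp at hi
  | cons a rest ih =>
    intro hss j
    have ha : '/' ∉ a := hss a List.mem_cons_self
    have hrest : ∀ t ∈ rest, '/' ∉ t := fun t ht => hss t (List.mem_cons_of_mem _ ht)
    obtain ⟨L, hpad, hLh⟩ := pvPad_decomp a rest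
    rcases Nat.lt_or_ge j 1 with hj0 | hj1
    · have hj : j = 0 := by omega
      subst hj
      rw [List.drop_zero, hpad]
      constructor
      · intro h
        rw [List.cons_append, List.cons_prefix_cons] at h
        have hka := (pvH1 kw a L hk ha hLh).mp h.2
        exact ⟨0, by simp, (pvOffset_zero _).symm, by rw [List.getD_cons_zero]; exact hka.symm⟩
      · rintro ⟨i, hi, hoff, hget⟩
        have hi0 : i = 0 := by
          cases i with
          | zero => rfl
          | succ k => rw [pvOffset_cons_succ] at hoff; omega
        subst hi0
        rw [List.getD_cons_zero] at hget
        rw [List.cons_append, List.cons_prefix_cons]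
        exact ⟨rfl, (pvH1 kw a L hk ha hLh).mpr hget.symm⟩
    · rcases Nat.lt_or_ge j (a.length + 1) with hja | hjb
      · constructor
        · intro h
          exfalso
          have hh := pvHeadPrefix _ _ h
          rw [hpad] at hh
          have hdrop : ('/' :: (a ++ L)).drop j = (a ++ L).drop (j - 1) := by
            cases j with
            | zero => omega
            | succ k => simp
          rw [hdrop, List.head?_drop, List.getElem?_append_left (by omega)] at hh
          rcases List.getElem?_eq_some_iff.mp hh with ⟨hlt, hEq⟩
          exact ha (by rw [← hEq]; exact List.getElem_mem hlt)
        · rintro ⟨i, hi, hoff, -⟩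
          exfalso
          cases i with
          | zero => rw [pvOffset_zero] at hoff; omega
          | succ k => rw [pvOffset_cons_succ] at hoff; omega
      · cases rest with
        | nil =>
          constructor
          · intro h
            exfalso
            have hPl : (pvPad [a]).length = a.length + 2 := by
              simp [pvPad, PySem.Chars.join_singleton]
            have hle := h.length_le
            rw [List.length_drop, hPl] at hle
            simp only [List.length_cons, List.length_append] at hle
            omega
          · rintro ⟨i, hi, hoff, -⟩
            exfalso
            simp only [List.length_cons, List.length_nil] at hi
            have hi0 : i = 0 := by omega
            subst hi0
            rw [pvOffset_zero] at hoff; omega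
        | cons b r =>
          rw [pvPad_cons_cons]
          have hD : (('/' :: a) ++ pvPad (b :: r)).drop j
              = (pvPad (b :: r)).drop (j - (a.length + 1)) := by
            rw [List.drop_append,
              List.drop_eq_nil_of_le (by simp only [List.length_cons]; omega),
              List.nil_append]
            congr 1
          rw [hD, ih hrest (j - (a.length + 1))]
          constructor
          · rintro ⟨i, hi, hoff, hget⟩
            refine ⟨i + 1, Nat.succ_lt_succ hi, ?_, ?_⟩
            · rw [pvOffset_cons_succ]; omega
            · rw [List.getD_cons_succ]; exact hget
          · rintro ⟨i, hi, hoff, hget⟩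
            cases i with
            | zero => rw [pvOffset_zero] at hoff; omega
            | succ k =>
              rw [pvOffset_cons_succ] at hoff
              refine ⟨k, Nat.lt_of_succ_lt_succ hi, ?_, ?_⟩
              · omega
              · rw [List.getD_cons_succ] at hget; exact hget

lemma pvFindPat (kw : List Char) (hkne : kw ≠ []) (hk : '/' ∉ kw)
    (ss : List (List Char)) (hss : ∀ t ∈ ss, '/' ∉ t) :
    PySem.Chars.find (pvPad ss) ('/' :: kw ++ ['/'])
      = (match ss.findIdx? (fun t => t == kw) with
         | none => -1
         | some i => (pvOffset ss i : ℤ)) := by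
  rcases hfi : ss.findIdx? (fun t => t == kw) with _ | i
  · show PySem.Chars.find (pvPad ss) ('/' :: kw ++ ['/']) = -1
    rw [PySem.Chars.find_eq_neg_one_iff]
    intro hinf
    have hiin := (PySem.Chars.isIn_iff_infix ('/' :: kw ++ ['/']) (pvPad ss)).mpr hinf
    rcases (PySem.Chars.exists_prefix_drop_iff_isIn ('/' :: kw ++ ['/']) (pvPad ss)).mpr hiin
      with ⟨j, hj⟩
    rcases (pvOcc kw hkne hk ss hss j).mp hj with ⟨i, hi1, -, hi3⟩
    have hmem := List.findIdx?_eq_none_iff.mp hfi (ss.getD i [])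
      (by rw [List.getD_eq_getElem ss [] hi1]; exact List.getElem_mem hi1)
    rw [hi3] at hmem
    simp at hmem
  · obtain ⟨hilen, hpi, hmin⟩ := List.findIdx?_eq_some_iff_getElem.mp hfi
    have hgi : ss.getD i [] = kw := by
      rw [List.getD_eq_getElem ss [] hilen]; exact eq_of_beq hpi
    have hocc : ('/' :: kw ++ ['/']) <+: (pvPad ss).drop (pvOffset ss i) :=
      (pvOcc kw hkne hk ss hss (pvOffset ss i)).mpr ⟨i, hilen, rfl, hgi⟩
    have hnonneg : 0 ≤ PySem.Chars.find (pvPad ss) ('/' :: kw ++ ['/']) := by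
      rw [PySem.Chars.find_nonneg_iff]
      exact (PySem.Chars.isIn_iff_infix _ _).mp
        ((PySem.Chars.exists_prefix_drop_iff_isIn _ _).mp ⟨_, hocc⟩)
    obtain ⟨hpre, hminF⟩ := PySem.Chars.find_spec hnonneg
    rcases (pvOcc kw hkne hk ss hss
        (PySem.Chars.find (pvPad ss) ('/' :: kw ++ ['/'])).toNat).mp hpre with ⟨i', h1, h2, h3⟩
    have hii' : i ≤ i' := by
      by_contra hlt
      have h4 : (ss[i']'h1 == kw) = true := by
        rw [← List.getD_eq_getElem ss [] h1, h3]
        simp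
      exact hmin i' (by omega) h4
    have hle1 : pvOffset ss i ≤ pvOffset ss i' :=
      pvOffset_mono ss i i' hii' (Nat.le_of_lt h1)
    have hle2 : ¬ (pvOffset ss i
        < (PySem.Chars.find (pvPad ss) ('/' :: kw ++ ['/'])).toNat) :=
      fun hc => hminF _ hc hocc
    show _ = ((pvOffset ss i : ℕ) : ℤ)
    rw [← Int.toNat_of_nonneg hnonneg]
    congr 1
    omega

-- min(hits, key=...) returns the unique strictly-minimal element
lemma pvFoldMin (l : List (ℤ × List Char)) : ∀ (b m : ℤ × List Char),
    (m = b ∨ m ∈ l) → (∀ x, (x = b ∨ x ∈ l) → x = m ∨ m.1 < x.1) →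
    l.foldl (fun b h => if h.1 < b.1 then h else b) b = m := by
  induction l with
  | nil =>
    intro b m h1 h2
    simp only [List.foldl_nil]
    rcases h1 with h1 | h1
    · exact h1.symm
    · simp at h1
  | cons h t ih =>
    intro b m h1 h2
    simp only [List.foldl_cons]
    apply ih
    · by_cases hm1 : m = h
      · by_cases hc : h.1 < b.1
        · left; rw [if_pos hc, hm1]
        · rcases h2 b (Or.inl rfl) with he | hlt
          · left; rw [if_neg hc]; exact he.symm
          · rw [hm1] at hlt; exact absurd hlt (by omega)
      · by_cases hm2 : m = b
        · by_cases hc : h.1 < b.1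
          · rcases h2 h (Or.inr List.mem_cons_self) with he | hlt
            · left; rw [if_pos hc]; exact he.symm
            · rw [hm2] at hlt; exact absurd hlt (by omega)
          · left; rw [if_neg hc]; exact hm2
        · rcases h1 with h1 | h1
          · exact absurd h1 hm2
          · rcases List.mem_cons.mp h1 with h1 | h1
            · exact absurd h1 hm1
            · right; exact h1
    · intro x hx
      apply h2
      rcases hx with hx | hx
      · by_cases hc : h.1 < b.1
        · rw [if_pos hc] at hx; right; rw [hx]; exact List.mem_cons_self
        · rw [if_neg hc] at hx; left; exact hx
      · right; exact List.mem_cons_of_mem _ hx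

lemma pvTakeJoin (ss : List (List Char)) : ∀ (i : ℕ), 1 ≤ i → i ≤ ss.length →
    (PySem.Chars.join ['/'] ss).take (pvOffset ss i - 1) = PySem.Chars.join ['/'] (ss.take i) := by
  induction ss with
  | nil => intro i h1 h2; simp at h2; omega
  | cons a rest ih =>
    intro i h1 h2
    cases i with
    | zero => omega
    | succ k =>
      rw [pvOffset_cons_succ]
      cases k with
      | zero =>
        rw [pvOffset_zero]
        have harith : a.length + 1 + 0 - 1 = a.length := by omega
        rw [harith, List.take_succ_cons, List.take_zero]
        rw [PySem.Chars.join_singleton]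
        cases rest with
        | nil => simp [PySem.Chars.join_singleton]
        | cons b r =>
          rw [PySem.Chars.join_cons_cons, List.append_assoc, List.take_left]
      | succ k' =>
        have hrestlen : k' + 1 ≤ rest.length := by
          simp only [List.length_cons] at h2; omega
        cases rest with
        | nil => simp at hrestlen
        | cons b r =>
          have hoff1 : 1 ≤ pvOffset (b :: r) (k' + 1) := by
            have := pvOffset_lt (b :: r) 0 (k' + 1) (by omega) hrestlen
            rw [pvOffset_zero] at this; omega
          have harith : a.length + 1 + pvOffset (b :: r) (k' + 1) - 1
              = a.length + (1 + (pvOffset (b :: r) (k' + 1) - 1)) := by omega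
          rw [harith, PySem.Chars.join_cons_cons, List.append_assoc, List.take_append]
          rw [List.take_of_length_le (by omega)]
          rw [show a.length + (1 + (pvOffset (b :: r) (k' + 1) - 1)) - a.length
              = (pvOffset (b :: r) (k' + 1) - 1) + 1 from by omega]
          rw [List.singleton_append, List.take_succ_cons]
          rw [ih (k' + 1) (by omega) hrestlen]
          conv_rhs => rw [List.take_succ_cons]
          rcases hT : (b :: r).take (k' + 1) with _ | ⟨t0, tt⟩
          · exfalso
            have hlen : ((b :: r).take (k' + 1)).length = k' + 1 := by
              rw [List.length_take]
              simp only [List.length_cons] at hrestlen ⊢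
              omega
            rw [hT] at hlen; simp at hlen
          · rw [PySem.Chars.join_cons_cons]
            simp

lemma pvDropJoin (ss : List (List Char)) : ∀ (i : ℕ), i ≤ ss.length →
    (PySem.Chars.join ['/'] ss).drop (pvOffset ss i) = PySem.Chars.join ['/'] (ss.drop i) := by
  induction ss with
  | nil => intro i h2; simp [pvOffset, PySem.Chars.join_nil]
  | cons a rest ih =>
    intro i h2
    cases i with
    | zero => rw [pvOffset_zero]; simp
    | succ k =>
      rw [pvOffset_cons_succ, List.drop_succ_cons]
      cases rest with
      | nil =>
        have hk : k = 0 := by simp only [List.length_cons, List.length_nil] at h2; omega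
        subst hk
        rw [pvOffset_zero, PySem.Chars.join_singleton]
        rw [List.drop_eq_nil_of_le (by omega)]
        simp [PySem.Chars.join_nil]
      | cons b r =>
        rw [PySem.Chars.join_cons_cons, List.append_assoc]
        rw [show a.length + 1 + pvOffset (b :: r) k
            = a.length + (1 + pvOffset (b :: r) k) from by omega]
        rw [List.drop_append]
        rw [List.drop_eq_nil_of_le (by omega), List.nil_append]
        rw [show a.length + (1 + pvOffset (b :: r) k) - a.length
            = pvOffset (b :: r) k + 1 from by omega]
        rw [List.singleton_append, List.drop_succ_cons]
        exact ih k (by simp only [List.length_cons] at h2 ⊢; omega)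

lemma pvLenJoin (ss : List (List Char)) (h : ss ≠ []) :
    (PySem.Chars.join ['/'] ss).length + 1 = pvOffset ss ss.length := by
  induction ss with
  | nil => exact absurd rfl h
  | cons a rest ih =>
    cases rest with
    | nil =>
      rw [PySem.Chars.join_singleton]
      simp [pvOffset]
    | cons b r =>
      have hih := ih (by simp)
      rw [PySem.Chars.join_cons_cons]
      rw [show (a :: b :: r).length = (b :: r).length + 1 from rfl, pvOffset_cons_succ]
      simp only [List.length_append, List.length_cons, List.length_nil] at hih ⊢
      omega

lemma pvSingletonPrefix (l : List Char) : ['/'] <+: l ↔ l.head? = some '/' := by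
  cases l with
  | nil => simp
  | cons c t =>
    simp only [List.cons_prefix_cons, List.head?_cons, Option.some.injEq]
    constructor
    · rintro ⟨h, -⟩; exact h.symm
    · intro h; exact ⟨h.symm, List.nil_prefix⟩

lemma pvSingletonInfix (l : List Char) : (['/'] : List Char) <:+: l ↔ '/' ∈ l := by
  constructor
  · rintro ⟨pre, post, h⟩
    rw [← h]; simp
  · intro h
    rcases List.append_of_mem h with ⟨pre, post, h⟩
    exact ⟨pre, post, by rw [h]; simp⟩

lemma pvFindSlash_none (u : List Char) (hu : '/' ∉ u) :
    PySem.Chars.find u ['/'] = -1 := by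
  rw [PySem.Chars.find_eq_neg_one_iff]
  intro h
  exact hu ((pvSingletonInfix u).mp h)

lemma pvFindSlash_mid (u w : List Char) (hu : '/' ∉ u) :
    PySem.Chars.find (u ++ '/' :: w) ['/'] = (u.length : ℤ) := by
  have hocc : (['/'] : List Char) <+: (u ++ '/' :: w).drop u.length := by
    rw [List.drop_left]
    exact (pvSingletonPrefix _).mpr rfl
  have hnonneg : 0 ≤ PySem.Chars.find (u ++ '/' :: w) ['/'] := by
    rw [PySem.Chars.find_nonneg_iff]
    exact (PySem.Chars.isIn_iff_infix _ _).mp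
      ((PySem.Chars.exists_prefix_drop_iff_isIn _ _).mp ⟨_, hocc⟩)
  obtain ⟨hpre, hmin⟩ := PySem.Chars.find_spec hnonneg
  set F := PySem.Chars.find (u ++ '/' :: w) ['/'] with hF
  have h1 : ¬ (u.length < F.toNat) := fun hc => hmin u.length hc hocc
  have h2 : ¬ (F.toNat < u.length) := by
    intro hc
    have := (pvSingletonPrefix _).mp hpre
    rw [List.head?_drop, List.getElem?_append_left hc] at this
    have : '/' ∈ u := by
      rcases List.getElem?_eq_some_iff.mp this with ⟨hlt, hEq⟩
      rw [← hEq]; exact List.getElem_mem hlt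
    exact hu this
  have : F.toNat = u.length := by omega
  rw [← Int.toNat_of_nonneg hnonneg, this]

lemma pvMemSlash (s : List Char) : PySem.Chars.isIn ['/'] s = true ↔ '/' ∈ s := by
  rw [PySem.Chars.isIn_iff_infix]
  exact pvSingletonInfix s

lemma pvOfList_inj (t : List Char) (w : String) : String.ofList t = w ↔ t = w.toList := by
  constructor
  · intro h; rw [← h]; simp
  · intro h; rw [h]; simp

lemma pvKw_facts : ∀ kw ∈ pvKw, kw ≠ [] ∧ '/' ∉ kw := by decide

-- A's loop through B's segment-index view (over the segment list)
lemma pvALoop_eq (l acc : List String) (rev : String) :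
    pvALoop l acc rev =
      match l.findIdx? (fun p => p ∈ ["commit", "tree", "blob", "tag"]) with
      | none => (acc ++ l, rev)
      | some idx => (acc ++ l.take idx,
          if idx + 1 < l.length then l.getD (idx + 1) "main" else rev) := by
  induction l generalizing acc with
  | nil => simp [pvALoop]
  | cons x rest ih =>
    by_cases hx : x ∈ ["commit", "tree", "blob", "tag"]
    · have hx' : (fun p => decide (p ∈ ["commit", "tree", "blob", "tag"])) x = true := by
        simpa using hx
      rw [pvALoop.eq_def]
      cases rest with
      | nil => simp only [List.findIdx?_cons, hx', if_pos hx, if_true]; simp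
      | cons y t => simp only [List.findIdx?_cons, hx', if_pos hx, if_true]; simp
    · have hx' : (fun p => decide (p ∈ ["commit", "tree", "blob", "tag"])) x = false := by
        simpa using hx
      rw [pvALoop.eq_def]
      simp only [if_neg hx]
      rw [ih]
      simp only [List.findIdx?_cons, hx', Bool.false_eq_true, if_false]
      cases h : rest.findIdx? (fun p => decide (p ∈ ["commit", "tree", "blob", "tag"])) with
      | none => simp
      | some idx =>
        simp only [Option.map_some]
        simp [List.take_succ_cons, List.getD]

-- bridge: the whole keyword branch of both programs, over the segment list
lemma pvCore (p1 : String) (ss : List (List Char)) (s : List Char)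
    (hs' : s = p1.toList)
    (hnos : ∀ t ∈ ss, '/' ∉ t) (hjoin : PySem.Chars.join ['/'] ss = s)
    (hne : ss ≠ []) :
    (let r := pvALoop (ss.map String.ofList) [] "main"
     ((some (PySem.Str.join "/" r.1), r.2) : Option String × String))
      = (let padded := '/' :: s ++ ['/']
         let hits := (pvKw.map (fun kw => (PySem.Chars.find padded ('/' :: kw ++ ['/']), kw))).filter
            (fun h => h.1 != -1)
         match hits with
         | [] => (some p1, "main")
         | h0 :: hrest =>
           let best := hrest.foldl (fun b h => if h.1 < b.1 then h else b) h0
           let pos := best.1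
           let kw := best.2
           let repo := if 0 < pos then PySem.Chars.slice s none (some (pos - 1)) else []
           let endi := pos + (kw.length : Int)
           if (s.length : Int) ≤ endi then (some (String.ofList repo), "main")
           else
             let rest := PySem.Chars.slice s (some (endi + 1)) none
             let k := PySem.Chars.find rest ['/']
             (some (String.ofList repo),
              String.ofList (if k = -1 then rest else PySem.Chars.slice rest none (some k)))) := by
  have hpadeq : ('/' :: s ++ ['/']) = pvPad ss := by rw [pvPad, hjoin]
  have hfidx : (ss.map String.ofList).findIdx? (fun p => p ∈ ["commit", "tree", "blob", "tag"])
      = ss.findIdx? (fun t => t ∈ pvKw) := by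
    rw [List.findIdx?_map]
    congr 1
    funext t
    simp [Function.comp, pvKw, pvOfList_inj]
  simp only [pvALoop_eq, hfidx, List.nil_append]
  rcases hidx : ss.findIdx? (fun t => t ∈ pvKw) with _ | i
  · -- no keyword segment: hits is empty, both sides return the whole path
    have hhits : ((pvKw.map (fun kw =>
          (PySem.Chars.find ('/' :: s ++ ['/']) ('/' :: kw ++ ['/']), kw))).filter
        (fun h => h.1 != -1)) = [] := by
      apply List.filter_eq_nil_iff.mpr
      intro x hx
      rcases List.mem_map.mp hx with ⟨kw, hkwmem, rfl⟩
      have hkf := pvKw_facts kw hkwmem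
      have hnone : ss.findIdx? (fun t => t == kw) = none := by
        rw [List.findIdx?_eq_none_iff]
        intro y hyss
        by_contra hbe
        simp only [Bool.not_eq_false, beq_iff_eq] at hbe
        have hy := List.findIdx?_eq_none_iff.mp hidx y hyss
        rw [hbe] at hy
        simp [hkwmem] at hy
      have hfind2 : PySem.Chars.find (pvPad ss) ('/' :: kw ++ ['/']) = -1 := by
        rw [pvFindPat kw hkf.1 hkf.2 ss hnos, hnone]
      simp only [bne_iff_ne, ne_eq, not_not]
      rw [hpadeq]
      exact hfind2
    rw [hhits]
    show (some (PySem.Str.join "/" (ss.map String.ofList)), "main") = (some p1, "main")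
    have hjoinstr : PySem.Str.join "/" (ss.map String.ofList) = p1 := by
      unfold PySem.Str.join
      rw [show ("/" : String).toList = ['/'] from rfl]
      have h3 : (ss.map String.ofList).map String.toList = ss := by
        rw [List.map_map]
        simp [Function.comp_def]
      rw [h3, hjoin, hs']
      simp
    rw [hjoinstr]
  · -- keyword segment at index i
    obtain ⟨hilen, hpIn, hminK⟩ := List.findIdx?_eq_some_iff_getElem.mp hidx
    have hkstEl : ss[i]'hilen = ss.getD i [] := (List.getD_eq_getElem ss [] hilen).symm
    have hkIn : ss.getD i [] ∈ pvKw := by rw [← hkstEl]; simpa using hpIn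
    have hkf := pvKw_facts _ hkIn
    have hfikst : ss.findIdx? (fun t => t == ss.getD i []) = some i := by
      rw [List.findIdx?_eq_some_iff_getElem]
      refine ⟨hilen, by rw [hkstEl]; exact beq_self_eq_true _, ?_⟩
      · intro j hj hbe
        apply hminK j hj
        have hjeq : ss[j]'(by omega) = ss.getD i [] := by simpa using hbe
        simp only [hjeq]
        exact decide_eq_true hkIn
    have hfindm : PySem.Chars.find ('/' :: s ++ ['/']) ('/' :: (ss.getD i []) ++ ['/'])
        = (pvOffset ss i : ℤ) := by
      rw [hpadeq, pvFindPat _ hkf.1 hkf.2 ss hnos, hfikst]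
    -- every hit is the winner or strictly to its right
    have hhit : ∀ x ∈ ((pvKw.map (fun kw =>
          (PySem.Chars.find ('/' :: s ++ ['/']) ('/' :: kw ++ ['/']), kw))).filter
        (fun h => h.1 != -1)),
        x = ((pvOffset ss i : ℤ), ss.getD i []) ∨ ((pvOffset ss i : ℤ)) < x.1 := by
      intro x hx
      rcases List.mem_filter.mp hx with ⟨hxmap, hxne⟩
      rcases List.mem_map.mp hxmap with ⟨kw, hkwmem, rfl⟩
      have hkf2 := pvKw_facts kw hkwmem
      rcases hf2 : ss.findIdx? (fun t => t == kw) with _ | ik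
      · exfalso
        have hfind2 : PySem.Chars.find (pvPad ss) ('/' :: kw ++ ['/']) = -1 := by
          rw [pvFindPat kw hkf2.1 hkf2.2 ss hnos, hf2]
        rw [hpadeq] at hxne
        simp only [bne_iff_ne, ne_eq] at hxne
        exact hxne hfind2
      · have hfind2 : PySem.Chars.find ('/' :: s ++ ['/']) ('/' :: kw ++ ['/'])
            = (pvOffset ss ik : ℤ) := by
          rw [hpadeq, pvFindPat kw hkf2.1 hkf2.2 ss hnos, hf2]
        obtain ⟨hiklen, hbik, hminik⟩ := List.findIdx?_eq_some_iff_getElem.mp hf2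
        have hgik : ss[ik]'hiklen = kw := by simpa using hbik
        have hile : i ≤ ik := by
          by_contra hlt
          apply hminK ik (by omega)
          simp only [hgik]
          exact decide_eq_true hkwmem
        by_cases hieq : ik = i
        · left
          have hkkst : kw = ss.getD i [] := by
            rw [← hgik]
            have hik2 : ik = i := hieq
            subst hik2
            exact hkstEl
          rw [hfind2, hkkst, hieq]
        · right
          rw [hfind2]
          show (pvOffset ss i : ℤ) < (pvOffset ss ik : ℤ)
          exact_mod_cast pvOffset_lt ss i ik (by omega) (Nat.le_of_lt hiklen)
    have hmmem : ((pvOffset ss i : ℤ), ss.getD i []) ∈ ((pvKw.map (fun kw =>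
          (PySem.Chars.find ('/' :: s ++ ['/']) ('/' :: kw ++ ['/']), kw))).filter
        (fun h => h.1 != -1)) := by
      rw [List.mem_filter]
      constructor
      · apply List.mem_map.mpr
        exact ⟨ss.getD i [], hkIn, by rw [hfindm]⟩
      · simp only [bne_iff_ne, ne_eq]
        omega
    rcases hhits : ((pvKw.map (fun kw =>
          (PySem.Chars.find ('/' :: s ++ ['/']) ('/' :: kw ++ ['/']), kw))).filter
        (fun h => h.1 != -1)) with _ | ⟨h0, hrest⟩
    · rw [hhits] at hmmem; simp at hmmem
    · have hfold : hrest.foldl (fun b h => if h.1 < b.1 then h else b) h0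
          = ((pvOffset ss i : ℤ), ss.getD i []) := by
        apply pvFoldMin
        · rw [hhits] at hmmem
          exact List.mem_cons.mp hmmem
        · intro x hx
          apply hhit
          rw [hhits]
          rcases hx with hx | hx
          · rw [hx]; exact List.mem_cons_self
          · exact List.mem_cons_of_mem _ hx
      simp only [hhits]
      rw [hfold]
      -- repo equality
      have hrepo : (if 0 < ((pvOffset ss i : ℤ), ss.getD i []).1
            then PySem.Chars.slice s none (some (((pvOffset ss i : ℤ), ss.getD i []).1 - 1)) else [])
          = PySem.Chars.join ['/'] (ss.take i) := by
        simp only []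
        by_cases hi0 : i = 0
        · subst hi0
          rw [pvOffset_zero]
          simp [PySem.Chars.join_nil]
        · have hop : 1 ≤ pvOffset ss i := by
            have := pvOffset_lt ss 0 i (by omega) (Nat.le_of_lt hilen)
            rw [pvOffset_zero] at this; omega
          rw [if_pos (by exact_mod_cast Nat.lt_of_lt_of_le Nat.zero_lt_one hop)]
          rw [show ((pvOffset ss i : ℤ) - 1) = ((pvOffset ss i - 1 : ℕ) : ℤ) from by omega]
          rw [PySem.Chars.slice_eq_listSlice, PySem.List.slice_to_natCast]
          rw [show s = PySem.Chars.join ['/'] ss from hjoin.symm]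
          exact pvTakeJoin ss i (by omega) (Nat.le_of_lt hilen)
      have hArepo : PySem.Str.join "/" ((ss.map String.ofList).take i)
          = String.ofList (PySem.Chars.join ['/'] (ss.take i)) := by
        unfold PySem.Str.join
        rw [show ("/" : String).toList = ['/'] from rfl]
        have h3 : ((ss.map String.ofList).take i).map String.toList = ss.take i := by
          rw [← List.map_take, List.map_map]
          simp [Function.comp_def]
        rw [h3]
      -- boundary: keyword is the last segment iff B's end check fires
      have hL := pvLenJoin ss hne
      rw [hjoin] at hL
      have hsucc := pvOffset_succ_take ss i hilen
      have hendN : (s.length ≤ pvOffset ss i + (ss.getD i []).length) ↔ ¬ (i + 1 < ss.length) := by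
        constructor
        · intro hc hltc
          have := pvOffset_lt ss (i + 1) ss.length hltc (Nat.le_refl _)
          omega
        · intro hge
          have hieq : i + 1 = ss.length := by omega
          rw [← hieq] at hL
          omega
      by_cases hlast : i + 1 < ss.length
      · rw [if_pos (by simpa using hlast)]
        have hBc : ¬ ((s.length : ℤ) ≤ ((pvOffset ss i : ℤ), ss.getD i []).1
              + (((pvOffset ss i : ℤ), ss.getD i []).2.length : ℤ)) := by
          simp only []
          intro hc
          exact (hendN.mp (by exact_mod_cast hc)) hlast
        rw [if_neg hBc]
        -- revision: next segment, cut at the next slash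
        have hrest2 : PySem.Chars.slice s
              (some (((pvOffset ss i : ℤ), ss.getD i []).1
                + (((pvOffset ss i : ℤ), ss.getD i []).2.length : ℤ) + 1)) none
            = PySem.Chars.join ['/'] (ss.drop (i + 1)) := by
          simp only []
          rw [show ((pvOffset ss i : ℤ) + ((ss.getD i []).length : ℤ) + 1)
              = ((pvOffset ss (i + 1) : ℕ) : ℤ) from by rw [hsucc]; push_cast; ring]
          rw [PySem.Chars.slice_eq_listSlice, PySem.List.slice_from_natCast]
          rw [show s = PySem.Chars.join ['/'] ss from hjoin.symm]
          exact pvDropJoin ss (i + 1) (by omega)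
        have hdecomp : ss.drop (i + 1) = ss.getD (i + 1) [] :: ss.drop (i + 2) := by
          rw [List.drop_eq_getElem_cons hlast, List.getD_eq_getElem ss [] hlast]
        have hd0no : '/' ∉ ss.getD (i + 1) [] := by
          rw [List.getD_eq_getElem ss [] hlast]
          exact hnos _ (List.getElem_mem hlast)
        have hArev : (ss.map String.ofList).getD (i + 1) "main"
            = String.ofList (ss.getD (i + 1) []) := by
          rw [List.getD_eq_getElem _ _ (by simpa using hlast), List.getElem_map,
            List.getD_eq_getElem ss [] hlast]
        rw [hrest2, hrepo, hArepo, hArev, hdecomp]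
        rcases hdd : ss.drop (i + 2) with _ | ⟨d1, dr⟩
        · rw [PySem.Chars.join_singleton]
          rw [pvFindSlash_none _ hd0no]
          simp
        · rw [PySem.Chars.join_cons_cons, List.append_assoc, List.singleton_append]
          rw [pvFindSlash_mid _ _ hd0no]
          rw [if_neg (by omega)]
          rw [PySem.Chars.slice_eq_listSlice, PySem.List.slice_to_natCast]
          rw [List.take_left]
      · rw [if_neg (by simpa using hlast)]
        have hBc : ((s.length : ℤ) ≤ ((pvOffset ss i : ℤ), ss.getD i []).1
              + (((pvOffset ss i : ℤ), ss.getD i []).2.length : ℤ)) := by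
          simp only []
          have := hendN.mpr hlast
          exact_mod_cast this
        rw [if_pos hBc]
        rw [hrepo, hArepo]

-- ===== VERDICT (by name: the statement is the Claim_ definition above) =====
theorem parse_huggingface_info_spec : Claim_equal_parse_huggingface_info := by
  intro model_version _
  unfold Spec_parse_huggingface_info parse_huggingface_info parse_huggingface_info_alt
  cases hs : PySem.Str.splitMax? model_version "huggingface.co/" 1 with
  | none => rfl
  | some parts =>
    by_cases h1 : parts.length < 2
    · simp [h1]
    · simp only [if_neg h1]
      have hsplit : PySem.Str.split? (parts.getD 1 "") "/"
          = some ((pvSplitSlash (parts.getD 1 "").toList).map String.ofList) := by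
        unfold PySem.Str.split? PySem.Chars.split?
        rw [show ("/" : String).toList = ['/'] from rfl]
        rw [if_neg (by simp)]
        rw [pvSplitOn_eq]
        rfl
      rw [hsplit]
      simp only [Option.getD_some]
      by_cases h2 : ((pvSplitSlash (parts.getD 1 "").toList).map String.ofList).length < 2
      · rw [if_pos h2]
        have hlt : ¬ 2 ≤ (pvSplitSlash (parts.getD 1 "").toList).length := by
          simpa using h2
        have hmem : PySem.Chars.isIn ['/'] (parts.getD 1 "").toList = false := by
          rw [Bool.eq_false_iff]
          intro htrue
          exact hlt ((pvSplitSlash_len2 _).mpr ((pvMemSlash _).mp htrue))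
        rw [if_pos hmem]
      · rw [if_neg h2]
        have hge2 : 2 ≤ (pvSplitSlash (parts.getD 1 "").toList).length := by
          simpa using h2
        have hmem : ¬ (PySem.Chars.isIn ['/'] (parts.getD 1 "").toList = false) := by
          simp only [Bool.not_eq_false]
          exact (pvMemSlash _).mpr ((pvSplitSlash_len2 _).mp hge2)
        rw [if_neg hmem]
        exact pvCore (parts.getD 1 "") (pvSplitSlash (parts.getD 1 "").toList)
          (parts.getD 1 "").toList rfl (pvSplitSlash_noslash _) (pvJoin_splitSlash _)
          (pvSplitSlash_ne_nil _)
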